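-- pv_equiv track=rewrite | github.com/Solvio-ScholarAI/extractor | app/services/extractors/tabula_extractor.py | _is_prose_text
-- ===== SOURCE A (Python) =====
-- def _is_prose_text(text: str) -> bool:
--     """Check if text appears to be prose (sentences) rather than table data"""
--     # Short text is unlikely to be prose
--     if len(text) < 20:
--         return False
--
--     # Check for sentence patterns
--     sentence_endings = text.count('.') + text.count('!') + text.count('?')
--     word_count = len(text.split())
--
--     # Prose typically has sentences and multiple words
--     if sentence_endings > 0 and word_count > 5:
--         # Check for common prose connectives
--         connectives = ['and', 'or', 'but', 'which', 'that', 'this', 'these', 'those',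
--                       'with', 'from', 'have', 'has', 'been', 'were', 'was', 'are', 'is']
--         text_lower = text.lower()
--         connective_count = sum(1 for word in connectives if f' {word} ' in f' {text_lower} ')
--
--         # If has sentence endings and connectives, likely prose
--         if connective_count >= 2:
--             return True
--
--     return False
-- ===== SOURCE B (Python) =====
-- def _is_prose_text(text: str) -> bool:
--     """Single-pass character-level state machine: one scan accumulates the
--     punctuation count, the whitespace-run word count, and the set of
--     space-delimited connective tokens."""
--     if len(text) < 20:
--         return False
--     CONNECTIVES = {'and', 'or', 'but', 'which', 'that', 'this', 'these', 'those',
--                    'with', 'from', 'have', 'has', 'been', 'were', 'was', 'are', 'is'}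
--     endings = 0
--     word_count = 0
--     in_word = False
--     token = []
--     found = set()
--     for ch in text:
--         if ch in '.!?':
--             endings += 1
--         if ch.isspace():
--             in_word = False
--         else:
--             if not in_word:
--                 word_count += 1
--             in_word = True
--         if ch == ' ':
--             tok = ''.join(token).lower()
--             if tok in CONNECTIVES:
--                 found.add(tok)
--             token = []
--         else:
--             token.append(ch)
--     tok = ''.join(token).lower()
--     if tok in CONNECTIVES:
--         found.add(tok)
--     return endings > 0 and word_count > 5 and len(found) >= 2
-- ===== Notes on version B (the rewrite author's own statement) =====
-- stated objective: alternative
-- what changed: A makes many staged library passes over the text (three .count scans, a split, and 17 padded-substring scans of the whole lowercased text); B is a single character-level state-machine pass that simultaneously accumulates the punctuation count, the whitespace-run word count, and the set of space-delimited connective tokens, then checks the three thresholds once.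
import Mathlib
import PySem

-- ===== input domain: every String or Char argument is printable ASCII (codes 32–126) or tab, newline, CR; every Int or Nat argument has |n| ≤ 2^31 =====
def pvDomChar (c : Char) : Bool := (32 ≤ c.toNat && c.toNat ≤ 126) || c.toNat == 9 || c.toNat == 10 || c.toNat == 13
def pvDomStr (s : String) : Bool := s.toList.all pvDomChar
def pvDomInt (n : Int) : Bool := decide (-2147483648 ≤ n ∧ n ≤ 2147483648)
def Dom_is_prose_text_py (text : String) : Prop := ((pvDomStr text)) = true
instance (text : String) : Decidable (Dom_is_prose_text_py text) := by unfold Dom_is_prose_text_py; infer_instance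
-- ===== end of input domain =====

-- B replaces A's staged library passes (three counts, a split, 17 padded-substring scans of the
-- whole text) by ONE character-level state-machine pass accumulating all three statistics (alternative).


-- ===== PORT A =====
def pyConnectives : List String :=
  ["and", "or", "but", "which", "that", "this", "these", "those",
   "with", "from", "have", "has", "been", "were", "was", "are", "is"]

def is_prose_text_py (text : String) : Bool :=
  if PySem.Str.len text < 20 then false
  else
    let sentence_endings : Nat :=
      PySem.Str.count text "." + PySem.Str.count text "!" + PySem.Str.count text "?"
    let word_count : Nat := (PySem.Str.split₀ text).length
    if sentence_endings > 0 && word_count > 5 then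
      let text_lower : String := PySem.Str.lower text
      let connective_count : Int :=
        pyConnectives.foldl
          (fun acc w =>
            if PySem.Str.isIn (" " ++ w ++ " ") (" " ++ text_lower ++ " ") then acc + 1 else acc) 0
      if 2 ≤ connective_count then true else false
    else false

-- ===== PORT B =====
-- the CONNECTIVES set literal of Source B (distinct members), as char-lists
def altConnectives : List (List Char) :=
  (["and", "or", "but", "which", "that", "this", "these", "those",
    "with", "from", "have", "has", "been", "were", "was", "are", "is"] : List String).map String.toList

-- the loop state of Source B's single pass
structure BState where
  endings : Int
  words : Int
  inWord : Bool
  tok : List Char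
  found : PySem.Set (List Char)

-- Source B's "tok = ''.join(token).lower(); if tok in CONNECTIVES: found.add(tok)"
def altFinish (fd : PySem.Set (List Char)) (tok : List Char) : PySem.Set (List Char) :=
  let t := PySem.Chars.lower tok
  if t ∈ altConnectives then PySem.Set.add fd t else fd

-- one iteration of Source B's "for ch in text" loop
def altStep (st : BState) (ch : Char) : BState :=
  let st := if ch = '.' ∨ ch = '!' ∨ ch = '?' then { st with endings := st.endings + 1 } else st
  let st := if PySem.Chars.isspace ch then { st with inWord := false }
            else { st with words := if st.inWord then st.words else st.words + 1, inWord := true }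
  if ch = ' ' then { st with found := altFinish st.found st.tok, tok := [] }
  else { st with tok := st.tok ++ [ch] }

def is_prose_text_py_alt (text : String) : Bool :=
  if PySem.Str.len text < 20 then false
  else
    let st := text.toList.foldl altStep ⟨0, 0, false, [], PySem.Set.empty⟩
    let found := altFinish st.found st.tok
    decide (0 < st.endings) && decide (5 < st.words) && decide (2 ≤ PySem.Set.len found)

-- ===== PRECONDITION & SPEC =====
def Spec_is_prose_text_py (text : String) (out : Bool) : Prop := out = is_prose_text_py_alt text
instance (text : String) (out : Bool) : Decidable (Spec_is_prose_text_py text out) := by unfold Spec_is_prose_text_py; infer_instance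

-- ===== CLAIM (what is proved, stated in full; the proofs are below) =====
def Claim_equal_is_prose_text_py : Prop := ∀ (text : String), Dom_is_prose_text_py text → Spec_is_prose_text_py text (is_prose_text_py text)

-- ===== LEMMAS AND PROOFS =====

/-- Structural tokeniser equal to Python's `s.split(' ')`. -/
def toks : List Char → List (List Char)
  | [] => [[]]
  | c :: rest =>
    if c = ' ' then [] :: toks rest
    else
      match toks rest with
      | [] => [[c]]
      | t :: ts => (c :: t) :: ts

lemma toks_cons_space (rest : List Char) : toks (' ' :: rest) = [] :: toks rest := by
  simp [toks]

lemma toks_cons_ne (c : Char) (rest : List Char) (hc : c ≠ ' ') (t : List Char)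
    (ts : List (List Char)) (h : toks rest = t :: ts) : toks (c :: rest) = (c :: t) :: ts := by
  simp [toks, hc, h]

lemma toks_ne_nil (cs : List Char) : toks cs ≠ [] := by
  cases cs with
  | nil => simp [toks]
  | cons c rest =>
    simp only [toks]
    split
    · simp
    · cases h : toks rest <;> simp

/-- Plain intercalation with a single space. -/
def interSp : List (List Char) → List Char
  | [] => []
  | [t] => t
  | t :: ts => t ++ ' ' :: interSp ts

lemma interSp_cons (t : List Char) (ts : List (List Char)) (h : ts ≠ []) :
    interSp (t :: ts) = t ++ ' ' :: interSp ts := by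
  cases ts with
  | nil => exact absurd rfl h
  | cons u us => rfl

lemma interSp_toks (cs : List Char) : interSp (toks cs) = cs := by
  induction cs with
  | nil => rfl
  | cons c rest ih =>
    by_cases hc : c = ' '
    · subst hc
      rw [toks_cons_space, interSp_cons _ _ (toks_ne_nil rest), ih]
      rfl
    · cases h : toks rest with
      | nil => exact absurd h (toks_ne_nil rest)
      | cons t ts =>
        rw [toks_cons_ne c rest hc t ts h]
        rw [h] at ih
        cases ts with
        | nil => simpa [interSp] using ih
        | cons u us =>
          simp only [interSp] at ih ⊢
          rw [List.cons_append, ih]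

lemma spacefree_toks (cs : List Char) : ∀ u ∈ toks cs, ' ' ∉ u := by
  induction cs with
  | nil => intro u hu; simp [toks] at hu; simp [hu]
  | cons c rest ih =>
    intro u hu
    by_cases hc : c = ' '
    · subst hc
      rw [toks_cons_space] at hu
      rcases List.mem_cons.mp hu with rfl | hu
      · simp
      · exact ih u hu
    · cases h : toks rest with
      | nil => exact absurd h (toks_ne_nil rest)
      | cons t ts =>
        rw [toks_cons_ne c rest hc t ts h] at hu
        simp only [List.mem_cons] at hu
        rcases hu with rfl | hu
        · intro hmem
          rcases List.mem_cons.mp hmem with h' | h'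
          · exact hc h'.symm
          · exact ih t (h ▸ List.mem_cons_self) h'
        · exact ih u (h ▸ List.mem_cons_of_mem _ hu)

lemma tokenEq : ∀ (u t ρ σ : List Char), ' ' ∉ u → ' ' ∉ t →
    u ++ ' ' :: ρ = t ++ ' ' :: σ → u = t := by
  intro u
  induction u with
  | nil =>
    intro t ρ σ _ ht h
    cases t with
    | nil => rfl
    | cons b t' =>
      simp only [List.nil_append, List.cons_append, List.cons.injEq] at h
      exact absurd (List.mem_cons_self) (h.1 ▸ ht)
  | cons a u' ih =>
    intro t ρ σ hu ht h
    cases t with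
    | nil =>
      simp only [List.cons_append, List.nil_append, List.cons.injEq] at h
      exact absurd (List.mem_cons_self) (h.1 ▸ hu)
    | cons b t' =>
      simp only [List.cons_append, List.cons.injEq] at h
      have := ih t' ρ σ (fun hm => hu (List.mem_cons_of_mem _ hm))
        (fun hm => ht (List.mem_cons_of_mem _ hm)) h.2
      rw [h.1, this]

lemma prefix_of_spacefree : ∀ (t : List Char), ' ' ∉ t →
    ∀ (s rest σ : List Char), s ++ ' ' :: rest = t ++ ' ' :: σ → ∃ q, s = t ++ q := by
  intro t
  induction t with
  | nil => intro _ s rest σ _; exact ⟨s, by simp⟩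
  | cons b t' ih =>
    intro ht s rest σ h
    cases s with
    | nil =>
      simp only [List.nil_append, List.cons_append, List.cons.injEq] at h
      exact absurd (List.mem_cons_self) (h.1 ▸ ht)
    | cons a s' =>
      simp only [List.cons_append, List.cons.injEq] at h
      obtain ⟨q, hq⟩ := ih (fun hm => ht (List.mem_cons_of_mem _ hm)) s' rest σ h.2
      exact ⟨q, by rw [h.1, hq]; rfl⟩

lemma padded_infix_iff (wl : List Char) (hw : ' ' ∉ wl) :
    ∀ ts : List (List Char), ts ≠ [] → (∀ u ∈ ts, ' ' ∉ u) →
      ((' ' :: (wl ++ [' '])) <:+: (' ' :: (interSp ts ++ [' '])) ↔ wl ∈ ts) := by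
  intro ts
  induction ts with
  | nil => intro h; exact absurd rfl h
  | cons t ts' ih =>
    intro _ hsf
    have htsf : ' ' ∉ t := hsf t List.mem_cons_self
    by_cases hts' : ts' = []
    · subst hts'
      constructor
      · rintro ⟨s, r, hsr⟩
        simp only [interSp] at hsr
        cases s with
        | nil =>
          simp only [List.nil_append, List.cons_append, List.cons.injEq] at hsr
          have h2 : wl ++ ' ' :: r = t ++ ' ' :: ([] : List Char) := by
            simpa [List.append_assoc] using hsr.2
          have := tokenEq wl t r [] hw htsf h2
          simp [this]
        | cons x s' =>
          exfalso
          simp only [List.cons_append, List.cons.injEq] at hsr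
          have h2 : s' ++ ' ' :: (wl ++ [' '] ++ r) = t ++ ' ' :: ([] : List Char) := by
            simpa [List.append_assoc] using hsr.2
          obtain ⟨q, hq⟩ := prefix_of_spacefree t htsf s' _ _ h2
          rw [hq, List.append_assoc] at h2
          have h3 := List.append_cancel_left h2
          have := congrArg List.length h3
          simp at this
          omega
      · intro hmem
        have : wl = t := by simpa using hmem
        subst this
        exact ⟨[], [], by simp [interSp]⟩
    · have hne : ts' ≠ [] := hts'
      rw [interSp_cons t ts' hne]
      constructor
      · rintro ⟨s, r, hsr⟩
        cases s with
        | nil =>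
          simp only [List.nil_append, List.cons_append, List.cons.injEq] at hsr
          have h2 : wl ++ ' ' :: r = t ++ ' ' :: (interSp ts' ++ [' ']) := by
            simpa [List.append_assoc] using hsr.2
          have := tokenEq wl t _ _ hw htsf h2
          simp [this]
        | cons x s' =>
          simp only [List.cons_append, List.cons.injEq] at hsr
          have h2 : s' ++ ' ' :: (wl ++ [' '] ++ r) = t ++ ' ' :: (interSp ts' ++ [' ']) := by
            simpa [List.append_assoc] using hsr.2
          obtain ⟨q, hq⟩ := prefix_of_spacefree t htsf s' _ _ h2
          rw [hq, List.append_assoc] at h2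
          have h3 := List.append_cancel_left h2
          have hinf : (' ' :: (wl ++ [' '])) <:+: (' ' :: (interSp ts' ++ [' '])) := by
            exact ⟨q, r, by simpa [List.append_assoc] using h3⟩
          have := (ih hne (fun v hv => hsf v (List.mem_cons_of_mem _ hv))).mp hinf
          exact List.mem_cons_of_mem _ this
      · intro hmem
        rcases List.mem_cons.mp hmem with rfl | hmem'
        · exact ⟨[], interSp ts' ++ [' '], by simp [List.append_assoc]⟩
        · have hinf := (ih hne (fun v hv => hsf v (List.mem_cons_of_mem _ hv))).mpr hmem'
          have hsuf : (' ' :: (interSp ts' ++ [' '])) <:+ (' ' :: (t ++ ' ' :: interSp ts' ++ [' '])) := by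
            exact ⟨' ' :: t, by simp [List.append_assoc]⟩
          exact hinf.trans hsuf.isInfix

lemma isIn_padded_iff (cs wl : List Char) (hw : ' ' ∉ wl) :
    (PySem.Chars.isIn (' ' :: (wl ++ [' '])) (' ' :: (cs ++ [' '])) = true) ↔ wl ∈ toks cs := by
  rw [PySem.Chars.isIn_iff_infix]
  have := padded_infix_iff wl hw (toks cs) (toks_ne_nil cs) (spacefree_toks cs)
  rwa [interSp_toks] at this

-- ---- A-side counting lemmas ----

lemma countGo_single (ch : Char) : ∀ (fuel : Nat) (l : List Char) (acc : Nat),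
    l.length ≤ fuel → PySem.Chars.count.go [ch] fuel l acc = acc + l.countP (· == ch) := by
  intro fuel
  induction fuel with
  | zero =>
    intro l acc h
    have : l = [] := List.eq_nil_of_length_eq_zero (Nat.le_zero.mp h)
    subst this; simp [PySem.Chars.count.go]
  | succ n ih =>
    intro l acc h
    cases l with
    | nil => simp [PySem.Chars.count.go]
    | cons c t =>
      simp only [PySem.Chars.count.go, List.isPrefixOf, Bool.and_true]
      simp only [List.length_cons, Nat.succ_le_succ_iff] at h
      by_cases hc : ch = c
      · subst hc
        simp only [BEq.rfl, if_true, List.length_cons, List.length_nil, List.drop_succ_cons,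
          List.drop_zero]
        rw [ih t (acc + 1) h]
        simp
        omega
      · have h1 : (ch == c) = false := by simpa using hc
        have h2 : (c == ch) = false := by simpa using (Ne.symm hc)
        simp only [h1, Bool.false_eq_true, if_false]
        rw [ih t acc h]
        simp [h2]

lemma count_single (cs : List Char) (ch : Char) :
    PySem.Chars.count cs [ch] = cs.countP (· == ch) := by
  unfold PySem.Chars.count
  simp only [List.isEmpty_cons, if_false, Bool.false_eq_true]
  rw [countGo_single ch cs.length cs 0 le_rfl]
  omega

def pEnd (c : Char) : Bool := c = '.' ∨ c = '!' ∨ c = '?'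

lemma countP_pEnd (cs : List Char) :
    cs.countP pEnd = cs.countP (· == '.') + cs.countP (· == '!') + cs.countP (· == '?') := by
  induction cs with
  | nil => simp
  | cons c rest ih =>
    simp only [List.countP_cons, ih, pEnd]
    by_cases h1 : c = '.' <;> by_cases h2 : c = '!' <;> by_cases h3 : c = '?' <;>
      simp_all <;> omega

/-- Word counter: `wcount iw cs` = number of whitespace-separated words started in `cs`,
given that a word is already open iff `iw`. -/
def wcount : Bool → List Char → Nat
  | _, [] => 0
  | iw, c :: rest =>
    if PySem.Chars.isspace c then wcount false rest
    else (if iw then 0 else 1) + wcount true rest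

lemma split0_go_len : ∀ (cs cur : List Char) (acc : List (List Char)),
    (PySem.Chars.split₀.go cs cur acc).length
      = acc.length + (if cur.isEmpty then 0 else 1) + wcount (!cur.isEmpty) cs := by
  intro cs
  induction cs with
  | nil =>
    intro cur acc
    simp only [PySem.Chars.split₀.go, wcount]
    split_ifs with h <;> simp
  | cons c rest ih =>
    intro cur acc
    simp only [PySem.Chars.split₀.go]
    by_cases hs : PySem.Chars.isspace c
    · simp only [hs, if_true, wcount]
      by_cases he : cur.isEmpty
      · simp only [he, if_true]
        rw [ih [] acc]
        simp
      · simp only [he, if_false, Bool.false_eq_true]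
        rw [ih [] (cur.reverse :: acc)]
        simp
    · simp only [hs, if_false, Bool.false_eq_true, wcount]
      rw [ih (c :: cur) acc]
      by_cases he : cur.isEmpty
      · simp [he]
        omega
      · simp [he]

lemma split0_len (cs : List Char) : (PySem.Chars.split₀ cs).length = wcount false cs := by
  unfold PySem.Chars.split₀
  rw [split0_go_len cs [] []]
  simp

-- ---- lowercasing vs space-tokenisation ----

lemma lowerChar_space : PySem.Chars.lowerChar ' ' = ' ' := by decide

lemma lowerChar_ne_space (c : Char) (h : c ≠ ' ') : PySem.Chars.lowerChar c ≠ ' ' := by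
  unfold PySem.Chars.lowerChar
  split
  · rename_i hu
    unfold PySem.Chars.isupper at hu
    simp only [Bool.and_eq_true, decide_eq_true_eq] at hu
    have ha : 65 ≤ c.toNat := hu.1
    have hb : c.toNat ≤ 90 := hu.2
    intro he
    have h2 : (Char.ofNat (c.toNat + 32)).toNat = 32 := by rw [he]; decide
    rw [Char.toNat_ofNat] at h2
    have hv : (c.toNat + 32).isValidChar := by
      unfold Nat.isValidChar
      left
      omega
    simp [hv] at h2
    omega
  · exact h

lemma toks_lower (cs : List Char) :
    toks (PySem.Chars.lower cs) = (toks cs).map PySem.Chars.lower := by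
  induction cs with
  | nil => simp [toks, PySem.Chars.lower]
  | cons c rest ih =>
    by_cases hc : c = ' '
    · subst hc
      have : PySem.Chars.lower (' ' :: rest) = ' ' :: PySem.Chars.lower rest := by
        simp [PySem.Chars.lower, lowerChar_space]
      rw [this, toks_cons_space, toks_cons_space, List.map_cons, ih]
      simp [PySem.Chars.lower]
    · have hstep : PySem.Chars.lower (c :: rest)
          = PySem.Chars.lowerChar c :: PySem.Chars.lower rest := by
        simp [PySem.Chars.lower]
      cases h : toks rest with
      | nil => exact absurd h (toks_ne_nil rest)
      | cons t ts =>
        rw [hstep]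
        cases hl : toks (PySem.Chars.lower rest) with
        | nil => exact absurd hl (toks_ne_nil _)
        | cons lt lts =>
          rw [toks_cons_ne _ _ (lowerChar_ne_space c hc) lt lts hl,
              toks_cons_ne c rest hc t ts h]
          rw [h, hl] at ih
          simp only [List.map_cons, List.cons.injEq] at ih ⊢
          exact ⟨by simp [PySem.Chars.lower, ih.1], ih.2⟩

-- ---- B-side fold characterisation ----

lemma endings_foldl : ∀ (cs : List Char) (st : BState),
    (cs.foldl altStep st).endings = st.endings + cs.countP pEnd := by
  intro cs
  induction cs with
  | nil => intro st; simp
  | cons c rest ih =>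
    intro st
    rw [List.foldl_cons, ih]
    have : (altStep st c).endings = st.endings + if pEnd c then 1 else 0 := by
      simp only [altStep, altFinish, pEnd]
      split_ifs <;> simp_all
    rw [this, List.countP_cons]
    split_ifs <;> push_cast <;> ring

lemma words_foldl : ∀ (cs : List Char) (st : BState),
    (cs.foldl altStep st).words = st.words + wcount st.inWord cs := by
  intro cs
  induction cs with
  | nil => intro st; simp [wcount]
  | cons c rest ih =>
    intro st
    rw [List.foldl_cons, ih]
    by_cases hs : PySem.Chars.isspace c
    · have h1 : (altStep st c).words = st.words := by
        simp only [altStep]; split_ifs <;> rfl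
      have h2 : (altStep st c).inWord = false := by
        simp only [altStep]; split_ifs <;> rfl
      rw [h1, h2, wcount, if_pos hs]
    · have h1 : (altStep st c).words = st.words + if st.inWord then 0 else 1 := by
        simp only [altStep]; split_ifs <;> simp_all
      have h2 : (altStep st c).inWord = true := by
        simp only [altStep]; split_ifs <;> rfl
      rw [h1, h2, wcount, if_neg hs]
      split_ifs <;> push_cast <;> ring

/-- Completed-token processor: Source B's `found` after running `altFinish` over a token list. -/
def procFound (fd : PySem.Set (List Char)) (ts : List (List Char)) : PySem.Set (List Char) :=
  ts.foldl altFinish fd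

lemma found_foldl : ∀ (cs : List Char) (st : BState),
    altFinish (cs.foldl altStep st).found (cs.foldl altStep st).tok
      = procFound st.found ((toks cs).modifyHead (fun t => st.tok ++ t)) := by
  intro cs
  induction cs with
  | nil => intro st; simp [toks, procFound]
  | cons c rest ih =>
    intro st
    rw [List.foldl_cons, ih]
    by_cases hc : c = ' '
    · subst hc
      have h1 : (altStep st ' ').found = altFinish st.found st.tok := by
        simp only [altStep]; split_ifs <;> rfl
      have h2 : (altStep st ' ').tok = [] := by
        simp only [altStep]; split_ifs <;> rfl
      rw [h1, h2, toks_cons_space]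
      have hmh : (toks rest).modifyHead (fun t => ([] : List Char) ++ t) = toks rest := by
        cases toks rest <;> simp
      rw [hmh]
      simp [procFound]
    · have h1 : (altStep st c).found = st.found := by
        simp only [altStep]; split_ifs <;> rfl
      have h2 : (altStep st c).tok = st.tok ++ [c] := by
        simp only [altStep]; split_ifs <;> rfl
      rw [h1, h2]
      cases h : toks rest with
      | nil => exact absurd h (toks_ne_nil rest)
      | cons t ts =>
        rw [toks_cons_ne c rest hc t ts h]
        simp [List.append_assoc]

lemma mem_procFound (ts : List (List Char)) : ∀ (fd : PySem.Set (List Char)) (x : List Char),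
    x ∈ procFound fd ts ↔ x ∈ fd ∨ (x ∈ altConnectives ∧ x ∈ ts.map PySem.Chars.lower) := by
  induction ts with
  | nil => intro fd x; simp [procFound]
  | cons t ts' ih =>
    intro fd x
    simp only [procFound, List.foldl_cons]
    rw [show (List.foldl altFinish (altFinish fd t) ts') = procFound (altFinish fd t) ts' from rfl,
        ih]
    simp only [altFinish, List.map_cons, List.mem_cons]
    split_ifs with h
    · rw [PySem.Set.mem_add]
      constructor
      · rintro ((hfd | rfl) | hr)
        · exact Or.inl hfd
        · exact Or.inr ⟨h, Or.inl rfl⟩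
        · exact Or.inr ⟨hr.1, Or.inr hr.2⟩
      · rintro (hfd | ⟨hconn, rfl | hmem⟩)
        · exact Or.inl (Or.inl hfd)
        · exact Or.inl (Or.inr rfl)
        · exact Or.inr ⟨hconn, hmem⟩
    · constructor
      · rintro (hfd | hr)
        · exact Or.inl hfd
        · exact Or.inr ⟨hr.1, Or.inr hr.2⟩
      · rintro (hfd | ⟨hconn, rfl | hmem⟩)
        · exact Or.inl hfd
        · exact absurd hconn h
        · exact Or.inr ⟨hconn, hmem⟩

lemma nodup_procFound (ts : List (List Char)) : ∀ (fd : PySem.Set (List Char)),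
    fd.Nodup → (procFound fd ts).Nodup := by
  induction ts with
  | nil => intro fd h; exact h
  | cons t ts' ih =>
    intro fd h
    simp only [procFound, List.foldl_cons]
    apply ih
    simp only [altFinish]
    split_ifs
    · exact PySem.Set.nodup_add fd _ h
    · exact h

lemma len_procFound (ts : List (List Char)) :
    PySem.Set.len (procFound PySem.Set.empty ts)
      = (altConnectives.countP (fun w => decide (w ∈ ts.map PySem.Chars.lower)) : Int) := by
  have hnd : (procFound PySem.Set.empty ts).Nodup := nodup_procFound ts _ (by simp [PySem.Set.empty])
  have hndf : (altConnectives.filter (fun w => decide (w ∈ ts.map PySem.Chars.lower))).Nodup :=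
    List.Nodup.filter _ (by decide)
  have hperm : (procFound PySem.Set.empty ts).Perm
      (altConnectives.filter (fun w => decide (w ∈ ts.map PySem.Chars.lower))) := by
    refine (List.perm_ext_iff_of_nodup hnd hndf).mpr ?_
    intro a
    rw [mem_procFound, List.mem_filter]
    simp [PySem.Set.empty]
  rw [PySem.Set.len, hperm.length_eq, ← List.countP_eq_length_filter]

-- ---- assembling the two counts ----

lemma cntA_eq (s : String) :
    (pyConnectives.foldl
      (fun acc w =>
        if PySem.Str.isIn (" " ++ w ++ " ") (" " ++ PySem.Str.lower s ++ " ") then acc + 1 else acc)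
      (0 : Int))
    = (pyConnectives.countP
        (fun w => decide (w.toList ∈ toks (PySem.Chars.lower s.toList))) : Int) := by
  rw [PySem.List.foldl_if_add_one, zero_add]
  congr 1
  apply List.countP_congr
  intro w hw
  have hpad : (" " ++ w ++ " ").toList = ' ' :: (w.toList ++ [' ']) := by
    simp
  have hpad2 : (" " ++ PySem.Str.lower s ++ " ").toList
      = ' ' :: (PySem.Chars.lower s.toList ++ [' ']) := by
    simp
  rw [PySem.Str.isIn_eq, hpad, hpad2]
  have hsp : ' ' ∉ w.toList := by fin_cases hw <;> decide
  simp [isIn_padded_iff _ _ hsp]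

lemma countP_conn_eq (tl : List Char) :
    altConnectives.countP (fun w => decide (w ∈ (toks tl).map PySem.Chars.lower))
      = pyConnectives.countP (fun w => decide (w.toList ∈ toks (PySem.Chars.lower tl))) := by
  rw [toks_lower, altConnectives, List.countP_map]
  rfl

-- ===== VERDICT (by name: the statement is the Claim_ definition above) =====
theorem is_prose_text_py_spec : Claim_equal_is_prose_text_py := by
  intro text _
  unfold Spec_is_prose_text_py
  by_cases hlen : PySem.Str.len text < 20
  · simp only [is_prose_text_py, is_prose_text_py_alt, if_pos hlen]
  · simp only [is_prose_text_py, is_prose_text_py_alt, if_neg hlen]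
    rw [endings_foldl, words_foldl, found_foldl]
    have hmh : (toks text.toList).modifyHead
        (fun t => (⟨0, 0, false, [], PySem.Set.empty⟩ : BState).tok ++ t)
        = toks text.toList := by
      cases toks text.toList <;> simp
    rw [hmh]
    rw [show (⟨0, 0, false, [], PySem.Set.empty⟩ : BState).endings = 0 from rfl,
        show (⟨0, 0, false, [], PySem.Set.empty⟩ : BState).words = 0 from rfl,
        show (⟨0, 0, false, [], PySem.Set.empty⟩ : BState).inWord = false from rfl,
        show (⟨0, 0, false, [], PySem.Set.empty⟩ : BState).found = PySem.Set.empty from rfl]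
    rw [len_procFound, countP_conn_eq, cntA_eq]
    simp only [PySem.Str.count_eq]
    simp only [show ("." : String).toList = ['.'] from rfl,
        show ("!" : String).toList = ['!'] from rfl,
        show ("?" : String).toList = ['?'] from rfl]
    simp only [count_single, ← countP_pEnd]
    have hw : (PySem.Str.split₀ text).length = wcount false text.toList := by
      have h := congrArg List.length (PySem.Str.split₀_map_toList text)
      rw [List.length_map, split0_len] at h
      exact h
    simp only [hw]
    by_cases h1 : 0 < text.toList.countP pEnd <;>
      by_cases h2 : 5 < wcount false text.toList <;>
        by_cases h3 : 2 ≤ (pyConnectives.countP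
            (fun w => decide (w.toList ∈ toks (PySem.Chars.lower text.toList))) : Int) <;>
      simp [h1, h2, h3]
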